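-- pv_equiv track=rewrite | github.com/adminstrator1999/development | leetcode/string/goal_parser_interpretation.py | interpret_easy
-- ===== SOURCE A (Python) =====
-- def interpret_easy(command: str) -> str:
--     output = []
--     commands = ["G", "()", "(al)"]
--     for i in range(len(command)):
--         if command[i] in commands:
--             output.append(command[i])
--         elif command[i:i + 2] in commands:
--             output.append('o')
--         elif command[i:i + 4] in commands:
--             output.append('al')
--     return "".join(output)
-- ===== SOURCE B (Python) =====
-- def interpret_easy(command: str) -> str:
--     out = []
--     i, n = 0, len(command)
--     while i < n:
--         if command[i] == 'G':
--             out.append('G')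
--             i += 1
--         elif command.startswith('(al)', i):
--             out.append('al')
--             i += 4
--         elif command.startswith('()', i):
--             out.append('o')
--             i += 2
--         else:
--             i += 1
--     return ''.join(out)
-- ===== Notes on version B (the rewrite author's own statement) =====
-- stated objective: alternative
-- what changed: A scans every index and tests three slices against a token list at each position; B is a consuming tokenizer that matches a token at the current position, appends its translation and jumps past it, otherwise skips one character.
import Mathlib
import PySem

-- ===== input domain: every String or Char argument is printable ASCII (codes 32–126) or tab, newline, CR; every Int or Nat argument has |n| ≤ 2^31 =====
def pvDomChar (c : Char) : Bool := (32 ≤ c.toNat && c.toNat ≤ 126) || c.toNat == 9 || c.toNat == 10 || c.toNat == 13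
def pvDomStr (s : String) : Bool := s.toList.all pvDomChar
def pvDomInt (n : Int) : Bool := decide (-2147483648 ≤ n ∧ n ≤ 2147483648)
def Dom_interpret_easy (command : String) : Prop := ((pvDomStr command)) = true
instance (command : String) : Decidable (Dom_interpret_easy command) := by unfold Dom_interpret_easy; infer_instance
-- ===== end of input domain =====

-- B replaces A's per-index slice-membership scan by a consuming tokenizer that skips past each
-- matched token ('G', '(al)', '()'); objective: alternative (idiomatic single-pass scanner).

-- ===== PORT A =====
-- A: for every index i, test command[i], command[i:i+2], command[i:i+4] against ["G","()","(al)"].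
def interpret_easy (command : String) : String :=
  let cs := command.toList
  let commands : List (List Char) := [['G'], ['(', ')'], ['(', 'a', 'l', ')']]
  let output : List (List Char) :=
    (PySem.List.pyRange 0 (cs.length : Int) 1).foldl (fun output i =>
      match PySem.List.pyGet? cs i with
      | none => output            -- unreachable: i ranges over valid indices
      | some c =>
        if [c] ∈ commands then output ++ [[c]]
        else if PySem.List.slice cs (some i) (some (i + 2)) ∈ commands then output ++ [['o']]
        else if PySem.List.slice cs (some i) (some (i + 4)) ∈ commands then output ++ [['a', 'l']]
        else output) []
  String.ofList (PySem.Chars.join [] output)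

-- ===== PORT B =====
-- B's while loop consumes the input left to right: match a token and jump past it, else skip one char.
def interpretAltGo : List Char → List (List Char)
  | [] => []
  | 'G' :: rest => ['G'] :: interpretAltGo rest
  | '(' :: 'a' :: 'l' :: ')' :: rest => ['a', 'l'] :: interpretAltGo rest
  | '(' :: ')' :: rest => ['o'] :: interpretAltGo rest
  | _ :: rest => interpretAltGo rest

def interpret_easy_alt (command : String) : String :=
  String.ofList (PySem.Chars.join [] (interpretAltGo command.toList))

-- ===== PRECONDITION & SPEC =====
def Spec_interpret_easy (command : String) (out : String) : Prop := out = interpret_easy_alt command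
instance (command : String) (out : String) : Decidable (Spec_interpret_easy command out) := by unfold Spec_interpret_easy; infer_instance

-- ===== CLAIM (what is proved, stated in full; the proofs are below) =====
def Claim_equal_interpret_easy : Prop := ∀ (command : String), Dom_interpret_easy command → Spec_interpret_easy command (interpret_easy command)

-- ===== LEMMAS AND PROOFS =====

-- A's contribution at index i depends only on the suffix cs.drop i.
def aStep (s : List Char) : List (List Char) :=
  match s with
  | [] => []
  | c :: _ =>
    if c = 'G' then [['G']]
    else if s.take 2 = ['(', ')'] then [['o']]
    else if s.take 4 = ['(', 'a', 'l', ')'] then [['a', 'l']]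
    else []

-- A's recursion over suffixes.
def aRec : List Char → List (List Char)
  | [] => []
  | c :: t => aStep (c :: t) ++ aRec t

lemma aStep_loop_body (cs : List Char) (i : Nat) (h : i < cs.length)
    (acc : List (List Char)) :
    (match PySem.List.pyGet? cs (i : Int) with
      | none => acc
      | some c =>
        if [c] ∈ ([['G'], ['(', ')'], ['(', 'a', 'l', ')']] : List (List Char)) then acc ++ [[c]]
        else if PySem.List.slice cs (some (i : Int)) (some ((i : Int) + 2)) ∈ ([['G'], ['(', ')'], ['(', 'a', 'l', ')']] : List (List Char)) then acc ++ [['o']]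
        else if PySem.List.slice cs (some (i : Int)) (some ((i : Int) + 4)) ∈ ([['G'], ['(', ')'], ['(', 'a', 'l', ')']] : List (List Char)) then acc ++ [['a', 'l']]
        else acc)
      = acc ++ aStep (cs.drop i) := by
  have hget : PySem.List.pyGet? cs (i : Int) = some cs[i] := by
    simp [PySem.List.pyGet?_natCast, List.getElem?_eq_getElem h]
  have hdrop : cs.drop i = cs[i] :: cs.drop (i + 1) := (List.getElem_cons_drop h).symm
  have h2 : PySem.List.slice cs (some (i : Int)) (some ((i : Int) + 2)) = (cs.drop i).take 2 := by
    have := PySem.List.slice_natCast_add cs i 2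
    simpa using this
  have h4 : PySem.List.slice cs (some (i : Int)) (some ((i : Int) + 4)) = (cs.drop i).take 4 := by
    have := PySem.List.slice_natCast_add cs i 4
    simpa using this
  rw [hget, h2, h4]
  set c := cs[i] with hc
  set t := cs.drop (i + 1) with ht
  rw [hdrop]
  simp only [aStep, List.mem_cons, List.take_succ_cons]
  by_cases hG : c = 'G'
  · simp [hG]
  · have m1 : ¬ ([c] = ['G'] ∨ [c] = ['(', ')'] ∨ [c] = ['(', 'a', 'l', ')'] ∨ [c] ∈ ([] : List (List Char))) := by
      simp [hG]
    rw [if_neg m1, if_neg hG]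
    by_cases hp : c :: t.take 1 = ['(', ')']
    · have m2 : (c :: t.take 1 = ['G'] ∨ c :: t.take 1 = ['(', ')'] ∨ c :: t.take 1 = ['(', 'a', 'l', ')'] ∨ c :: t.take 1 ∈ ([] : List (List Char))) := by
        exact Or.inr (Or.inl hp)
      rw [if_pos m2, if_pos hp]
    · have m2 : ¬ (c :: t.take 1 = ['G'] ∨ c :: t.take 1 = ['(', ')'] ∨ c :: t.take 1 = ['(', 'a', 'l', ')'] ∨ c :: t.take 1 ∈ ([] : List (List Char))) := by
        rintro (h1 | h1 | h1 | h1)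
        · exact hG (by injection h1)
        · exact hp h1
        · have : t.take 1 = ['a', 'l', ')'] := by injection h1
          have := congrArg List.length this
          simp at this
          omega
        · simp at h1
      rw [if_neg m2, if_neg hp]
      by_cases hq : c :: t.take 3 = ['(', 'a', 'l', ')']
      · have m3 : (c :: t.take 3 = ['G'] ∨ c :: t.take 3 = ['(', ')'] ∨ c :: t.take 3 = ['(', 'a', 'l', ')'] ∨ c :: t.take 3 ∈ ([] : List (List Char))) := Or.inr (Or.inr (Or.inl hq))
        rw [if_pos m3, if_pos hq]
      · have m3 : ¬ (c :: t.take 3 = ['G'] ∨ c :: t.take 3 = ['(', ')'] ∨ c :: t.take 3 = ['(', 'a', 'l', ')'] ∨ c :: t.take 3 ∈ ([] : List (List Char))) := by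
          rintro (h1 | h1 | h1 | h1)
          · exact hG (by injection h1)
          · -- c :: take 3 t = ['(', ')'] forces take 1 t = [')'], contradicting hp
            have hc' : c = '(' := by injection h1
            have ht3 : t.take 3 = [')'] := by injection h1
            have : t.take 1 = [')'] := by
              have := congrArg (List.take 1) ht3
              simpa [List.take_take] using this
            exact hp (by rw [hc', this])
          · exact hq h1
          · simp at h1
        rw [if_neg m3, if_neg hq]
        simp

-- A's fold equals the suffix recursion.
lemma foldA_eq_aRec (cs : List Char) :
    (List.range cs.length).flatMap (fun i => aStep (cs.drop i)) = aRec cs := by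
  induction cs with
  | nil => rfl
  | cons c t ih =>
    rw [show (c :: t).length = t.length + 1 from rfl, List.range_succ_eq_map,
      List.flatMap_cons, List.flatMap_map]
    simp only [List.drop_zero, Nat.succ_eq_add_one, List.drop_succ_cons]
    rw [ih]
    rfl

-- aStep vanishes on suffixes that start neither with 'G' nor with '('.
lemma aStep_eq_nil_of_head (c : Char) (t : List Char) (hG : c ≠ 'G') (hP : c ≠ '(') :
    aStep (c :: t) = [] := by
  simp only [aStep, List.take_succ_cons]
  rw [if_neg hG, if_neg (by intro h; exact hP (by injection h)),
    if_neg (by intro h; exact hP (by injection h))]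

-- The suffix recursion produces exactly B's token list.
lemma aRec_eq_altGo (cs : List Char) : aRec cs = interpretAltGo cs := by
  induction cs using interpretAltGo.induct with
  | case1 => rfl
  | case2 rest ih =>
    simp only [aRec, interpretAltGo, aStep, if_pos]
    rw [ih]
    simp
  | case3 rest ih =>
    show aStep _ ++ aRec ('a' :: 'l' :: ')' :: rest) = _
    have h1 : aStep ('(' :: 'a' :: 'l' :: ')' :: rest) = [['a', 'l']] := by
      simp [aStep]
    have h2 : aRec ('a' :: 'l' :: ')' :: rest) = aRec ('l' :: ')' :: rest) := by
      rw [show aRec ('a' :: 'l' :: ')' :: rest) = aStep ('a' :: 'l' :: ')' :: rest) ++ aRec ('l' :: ')' :: rest) from rfl,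
        aStep_eq_nil_of_head 'a' _ (by decide) (by decide)]
      rfl
    have h3 : aRec ('l' :: ')' :: rest) = aRec (')' :: rest) := by
      rw [show aRec ('l' :: ')' :: rest) = aStep ('l' :: ')' :: rest) ++ aRec (')' :: rest) from rfl,
        aStep_eq_nil_of_head 'l' _ (by decide) (by decide)]
      rfl
    have h4 : aRec (')' :: rest) = aRec rest := by
      rw [show aRec (')' :: rest) = aStep (')' :: rest) ++ aRec rest from rfl,
        aStep_eq_nil_of_head ')' _ (by decide) (by decide)]
      rfl
    rw [h1, h2, h3, h4, ih]
    rfl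
  | case4 rest ih =>
    show aStep _ ++ aRec (')' :: rest) = _
    have h1 : aStep ('(' :: ')' :: rest) = [['o']] := by simp [aStep]
    have h4 : aRec (')' :: rest) = aRec rest := by
      rw [show aRec (')' :: rest) = aStep (')' :: rest) ++ aRec rest from rfl,
        aStep_eq_nil_of_head ')' _ (by decide) (by decide)]
      rfl
    rw [h1, h4, ih]
    rfl
  | case5 c rest h2 h3 h4 ih =>
    show aStep (c :: rest) ++ aRec rest = interpretAltGo (c :: rest)
    have hstep : aStep (c :: rest) = [] := by
      by_cases hP : c = '('
      · subst hP
        have hA : ('(' :: List.take 1 rest) ≠ ['(', ')'] := by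
          intro hh
          have h1 : rest.take 1 = [')'] := by injection hh
          cases rest with
          | nil => simp at h1
          | cons d r =>
            simp [List.take_succ_cons] at h1
            exact h4 r rfl (by rw [h1])
        have hB : ('(' :: List.take 3 rest) ≠ ['(', 'a', 'l', ')'] := by
          intro hh
          have h1 : rest.take 3 = ['a', 'l', ')'] := by injection hh
          cases rest with
          | nil => simp at h1
          | cons d r =>
            cases r with
            | nil => simp at h1
            | cons e q =>
              cases q with
              | nil => simp at h1
              | cons f p =>
                simp [List.take_succ_cons] at h1
                obtain ⟨hd, he, hf⟩ := h1
                exact h3 p rfl (by rw [hd, he, hf])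
        simp only [aStep, List.take_succ_cons]
        rw [if_neg (by decide), if_neg hA, if_neg hB]
      · exact aStep_eq_nil_of_head c rest (fun hh => h2 hh) hP
    have halt : interpretAltGo (c :: rest) = interpretAltGo rest := by
      rw [interpretAltGo.eq_def]
      split
      · simp_all
      · rename_i heq; injection heq with hc _; exact absurd hc h2
      · rename_i heq
        injection heq with hc hr
        exact absurd hr (fun hh => h3 _ hc hh)
      · rename_i heq
        injection heq with hc hr
        exact absurd hr (fun hh => h4 _ hc hh)
      · rename_i heq
        injection heq with _ hr
        rw [hr]
    rw [hstep, halt, ih]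
    rfl

lemma interpret_tokens_eq (cs : List Char) :
    (PySem.List.pyRange 0 (cs.length : Int) 1).foldl (fun output i =>
      match PySem.List.pyGet? cs i with
      | none => output
      | some c =>
        if [c] ∈ ([['G'], ['(', ')'], ['(', 'a', 'l', ')']] : List (List Char)) then output ++ [[c]]
        else if PySem.List.slice cs (some i) (some (i + 2)) ∈ ([['G'], ['(', ')'], ['(', 'a', 'l', ')']] : List (List Char)) then output ++ [['o']]
        else if PySem.List.slice cs (some i) (some (i + 4)) ∈ ([['G'], ['(', ')'], ['(', 'a', 'l', ')']] : List (List Char)) then output ++ [['a', 'l']]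
        else output) []
      = interpretAltGo cs := by
  rw [PySem.List.pyRange_zero_natCast, List.foldl_map]
  have hcong : ∀ (acc : List (List Char)) (i : Nat), i ∈ List.range cs.length →
      (fun (output : List (List Char)) (i : Nat) =>
        match PySem.List.pyGet? cs (i : Int) with
        | none => output
        | some c =>
          if [c] ∈ ([['G'], ['(', ')'], ['(', 'a', 'l', ')']] : List (List Char)) then output ++ [[c]]
          else if PySem.List.slice cs (some (i : Int)) (some ((i : Int) + 2)) ∈ ([['G'], ['(', ')'], ['(', 'a', 'l', ')']] : List (List Char)) then output ++ [['o']]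
          else if PySem.List.slice cs (some (i : Int)) (some ((i : Int) + 4)) ∈ ([['G'], ['(', ')'], ['(', 'a', 'l', ')']] : List (List Char)) then output ++ [['a', 'l']]
          else output) acc i
      = acc ++ aStep (cs.drop i) := by
    intro acc i hi
    exact aStep_loop_body cs i (List.mem_range.mp hi) acc
  rw [PySem.List.foldl_congr_mem _ _ _ _ hcong, PySem.List.foldl_append_eq_flatMap,
    List.nil_append, foldA_eq_aRec, aRec_eq_altGo]

-- ===== VERDICT (by name: the statement is the Claim_ definition above) =====
theorem interpret_easy_spec : Claim_equal_interpret_easy := by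
  intro command _
  exact congrArg (fun o => String.ofList (PySem.Chars.join [] o)) (interpret_tokens_eq command.toList)
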